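-- pv_equiv track=rewrite | github.com/public-arch/Marithmetics | audits/gum_bundle_v30.py | classify_role
-- ===== SOURCE A (Python) =====
-- def classify_role(name: str) -> str:
--     n = name.lower()
--     if n.endswith(".json"):
--         return "primary_results_json" if any(x in n for x in ["outputs", "results", "report", "manifest"]) else "json"
--     if n.endswith(".png"):
--         return "figure_png"
--     if n.endswith(".pdf"):
--         return "figure_pdf"
--     if n.endswith(".csv"):
--         return "table_csv"
--     if n.endswith(".txt"):
--         return "text_txt"
--     return "unknown"
-- ===== SOURCE B (Python) =====
-- _SUFFIX_ROLES = [(".png", "figure_png"), (".pdf", "figure_pdf"),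
--                  (".csv", "table_csv"), (".txt", "text_txt"), (".json", "json")]
--
-- def _build_trie():
--     # node = [terminal_role_or_None, {char: next_node_index}]
--     nodes = [[None, {}]]
--     for suf, role in _SUFFIX_ROLES:
--         i = 0
--         for c in reversed(suf):
--             j = nodes[i][1].get(c)
--             if j is None:
--                 nodes.append([None, {}])
--                 j = len(nodes) - 1
--                 nodes[i][1][c] = j
--             i = j
--         nodes[i][0] = role
--     return nodes
--
-- _TRIE = _build_trie()
--
-- def classify_role(name: str) -> str:
--     n = name.lower()
--     i = 0
--     for c in reversed(n):
--         j = _TRIE[i][1].get(c)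
--         if j is None:
--             break
--         i = j
--     role = _TRIE[i][0]
--     if role is None:
--         return "unknown"
--     if role == "json":
--         return "primary_results_json" if any(k in n for k in ("outputs", "results", "report", "manifest")) else "json"
--     return role
-- ===== Notes on version B (the rewrite author's own statement) =====
-- stated objective: alternative
-- what changed: B builds a reversed-suffix trie once (a node array with char-to-child-index edges) and classifies by walking the reversed lowercase name through this automaton until it stalls, instead of A's chain of endswith tests; the json keyword branch is kept.
import Mathlib
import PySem

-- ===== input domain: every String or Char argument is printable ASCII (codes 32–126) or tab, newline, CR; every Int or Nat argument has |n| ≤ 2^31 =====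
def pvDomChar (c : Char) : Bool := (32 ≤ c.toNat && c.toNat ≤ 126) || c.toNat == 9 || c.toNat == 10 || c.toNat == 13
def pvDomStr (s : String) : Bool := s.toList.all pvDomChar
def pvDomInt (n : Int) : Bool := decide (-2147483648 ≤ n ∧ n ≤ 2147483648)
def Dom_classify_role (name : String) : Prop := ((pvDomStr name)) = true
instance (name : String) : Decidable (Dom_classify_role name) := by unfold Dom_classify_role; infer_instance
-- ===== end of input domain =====

-- B classifies by walking the reversed lowercase name through a reversed-suffix trie
-- (a node array built once from the suffix→role table) instead of A's chain of endswith tests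
-- (objective: alternative).

set_option maxRecDepth 40000

-- ===== PORT A =====
def classify_role (name : String) : String :=
  let n := PySem.Str.lower name
  if PySem.Str.endswith n ".json" then
    if ["outputs", "results", "report", "manifest"].any (fun x => PySem.Str.isIn x n) then
      "primary_results_json" else "json"
  else if PySem.Str.endswith n ".png" then "figure_png"
  else if PySem.Str.endswith n ".pdf" then "figure_pdf"
  else if PySem.Str.endswith n ".csv" then "table_csv"
  else if PySem.Str.endswith n ".txt" then "text_txt"
  else "unknown"

-- ===== PORT B =====
def pvSuffixRoles : List (String × String) :=
  [(".png", "figure_png"), (".pdf", "figure_pdf"),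
   (".csv", "table_csv"), (".txt", "text_txt"), (".json", "json")]

-- port of Source B's _build_trie(): node = (terminal role, char → child index)
def pvBuildTrie : List (Option String × PySem.Dict Char Nat) :=
  pvSuffixRoles.foldl (fun nodes sr =>
    let st := sr.1.toList.reverse.foldl
      (fun (st : List (Option String × PySem.Dict Char Nat) × Nat) c =>
        let nodes := st.1
        let i := st.2
        match (nodes.getD i (none, PySem.Dict.empty)).2.get? c with
        | some j => (nodes, j)
        | none =>
          let nodes1 := nodes ++ [(none, PySem.Dict.empty)]
          let j := nodes1.length - 1
          let nodes2 := nodes1.set i ((nodes1.getD i (none, PySem.Dict.empty)).1,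
            (nodes1.getD i (none, PySem.Dict.empty)).2.insert c j)
          (nodes2, j))
      (nodes, 0)
    st.1.set st.2 (some sr.2, (st.1.getD st.2 (none, PySem.Dict.empty)).2))
    [(none, PySem.Dict.empty)]

-- _TRIE[i]; the walk only produces in-range indices, so getD is exact
def pvNode (i : Nat) : Option String × PySem.Dict Char Nat :=
  pvBuildTrie.getD i (none, PySem.Dict.empty)

-- the for/break loop of Source B
def pvWalk : Nat → List Char → Nat
  | i, [] => i
  | i, c :: r =>
    match (pvNode i).2.get? c with
    | none => i
    | some j => pvWalk j r

def classify_role_alt (name : String) : String :=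
  let n := PySem.Str.lower name
  let i := pvWalk 0 n.toList.reverse
  match (pvNode i).1 with
  | none => "unknown"
  | some role =>
    if role = "json" then
      if ["outputs", "results", "report", "manifest"].any (fun k => PySem.Str.isIn k n) then
        "primary_results_json" else "json"
    else role

-- ===== PRECONDITION & SPEC =====
def Spec_classify_role (name : String) (out : String) : Prop := out = classify_role_alt name
instance (name : String) (out : String) : Decidable (Spec_classify_role name out) := by unfold Spec_classify_role; infer_instance

-- ===== CLAIM (what is proved, stated in full; the proofs are below) =====
def Claim_equal_classify_role : Prop := ∀ (name : String), Dom_classify_role name → Spec_classify_role name (classify_role name)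

-- ===== LEMMAS AND PROOFS =====

lemma pv_endswith_eq_decide (m p : List Char) :
    PySem.Chars.endswith m p = decide (p.reverse <+: m.reverse) := by
  by_cases h : p.reverse <+: m.reverse
  · simp [h, (PySem.Chars.endswith_iff _ _).mpr (List.reverse_prefix.mp h)]
  · have h' : ¬ p <:+ m := fun hs => h (List.reverse_prefix.mpr hs)
    simp only [h, decide_false]
    exact Bool.eq_false_iff.mpr (fun hb => h' ((PySem.Chars.endswith_iff _ _).mp hb))

-- lookup in a single-entry literal dict
lemma pv_get_one (k : Char) (v : Nat) (c : Char) :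
    (PySem.Dict.mk [(k, v)]).get? c = if k = c then some v else none := by
  simp [PySem.Dict.get?_mk_cons,
    show PySem.Dict.mk ([] : List (Char × Nat)) = PySem.Dict.empty from rfl,
    PySem.Dict.get?_empty]

-- terminal trie node: the walk stops and reports the role
lemma pv_step_term (i : Nat) (role : String)
    (hterm : (pvNode i).1 = some role) (hdict : (pvNode i).2 = PySem.Dict.empty) :
    ∀ r, (pvNode (pvWalk i r)).1 = if ([] : List Char) <+: r then some role else none := by
  intro r
  cases r <;> simp [pvWalk, hterm, hdict, PySem.Dict.get?_empty]

-- single-edge trie node: the walk consumes the edge character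
lemma pv_step_one (i j : Nat) (c0 : Char) (s : List Char) (role : String)
    (hterm : (pvNode i).1 = none) (hdict : (pvNode i).2 = PySem.Dict.mk [(c0, j)])
    (ih : ∀ r, (pvNode (pvWalk j r)).1 = if s <+: r then some role else none) :
    ∀ r, (pvNode (pvWalk i r)).1 = if (c0 :: s) <+: r then some role else none := by
  intro r
  cases r with
  | nil => simp [pvWalk, hterm]
  | cons c r' =>
    simp only [pvWalk, hdict, pv_get_one]
    by_cases hc : c0 = c
    · subst hc
      simp [ih r', List.cons_prefix_cons]
    · simp [hterm, List.cons_prefix_cons, fun h : c0 = c => hc h]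

lemma pv_walk_root : ∀ r : List Char, (pvNode (pvWalk 0 r)).1 =
    if ['n','o','s','j','.'] <+: r then some "json"
    else if ['g','n','p','.'] <+: r then some "figure_png"
    else if ['f','d','p','.'] <+: r then some "figure_pdf"
    else if ['v','s','c','.'] <+: r then some "table_csv"
    else if ['t','x','t','.'] <+: r then some "text_txt"
    else none := by
  have L4 := pv_step_term 4 "figure_png" rfl rfl
  have L3 := pv_step_one 3 4 '.' [] "figure_png" rfl rfl L4
  have L2 := pv_step_one 2 3 'p' ['.'] "figure_png" rfl rfl L3
  have L1 := pv_step_one 1 2 'n' ['p','.'] "figure_png" rfl rfl L2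
  have M4 := pv_step_term 8 "figure_pdf" rfl rfl
  have M3 := pv_step_one 7 8 '.' [] "figure_pdf" rfl rfl M4
  have M2 := pv_step_one 6 7 'p' ['.'] "figure_pdf" rfl rfl M3
  have M1 := pv_step_one 5 6 'd' ['p','.'] "figure_pdf" rfl rfl M2
  have N4 := pv_step_term 12 "table_csv" rfl rfl
  have N3 := pv_step_one 11 12 '.' [] "table_csv" rfl rfl N4
  have N2 := pv_step_one 10 11 'c' ['.'] "table_csv" rfl rfl N3
  have N1 := pv_step_one 9 10 's' ['c','.'] "table_csv" rfl rfl N2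
  have O4 := pv_step_term 16 "text_txt" rfl rfl
  have O3 := pv_step_one 15 16 '.' [] "text_txt" rfl rfl O4
  have O2 := pv_step_one 14 15 't' ['.'] "text_txt" rfl rfl O3
  have O1 := pv_step_one 13 14 'x' ['t','.'] "text_txt" rfl rfl O2
  have P5 := pv_step_term 21 "json" rfl rfl
  have P4 := pv_step_one 20 21 '.' [] "json" rfl rfl P5
  have P3 := pv_step_one 19 20 'j' ['.'] "json" rfl rfl P4
  have P2 := pv_step_one 18 19 's' ['j','.'] "json" rfl rfl P3
  have P1 := pv_step_one 17 18 'o' ['s','j','.'] "json" rfl rfl P2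
  intro r
  cases r with
  | nil => simp [pvWalk, show (pvNode 0).1 = (none : Option String) from rfl]
  | cons c r' =>
    have hroot : (pvNode 0).2 =
        PySem.Dict.mk [('g',1),('f',5),('v',9),('t',13),('n',17)] := rfl
    simp only [pvWalk, hroot, PySem.Dict.get?_mk_cons]
    by_cases hg : c = 'g'
    · subst hg; simp [L1 r', List.cons_prefix_cons]
    · by_cases hf : c = 'f'
      · subst hf; simp [M1 r', List.cons_prefix_cons]
      · by_cases hv : c = 'v'
        · subst hv; simp [N1 r', List.cons_prefix_cons]
        · by_cases ht : c = 't'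
          · subst ht; simp [O1 r', List.cons_prefix_cons]
          · by_cases hn : c = 'n'
            · subst hn; simp [P1 r', List.cons_prefix_cons]
            · simp [show ('g' == c) = false from beq_eq_false_iff_ne.mpr (fun h => hg h.symm),
                    show ('f' == c) = false from beq_eq_false_iff_ne.mpr (fun h => hf h.symm),
                    show ('v' == c) = false from beq_eq_false_iff_ne.mpr (fun h => hv h.symm),
                    show ('t' == c) = false from beq_eq_false_iff_ne.mpr (fun h => ht h.symm),
                    show ('n' == c) = false from beq_eq_false_iff_ne.mpr (fun h => hn h.symm),
                    show PySem.Dict.mk ([] : List (Char × Nat)) = PySem.Dict.empty from rfl,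
                    show (pvNode 0).1 = (none : Option String) from rfl,
                    PySem.Dict.get?_empty, List.cons_prefix_cons,
                    Ne.symm hn, Ne.symm hg, Ne.symm hf, Ne.symm hv, Ne.symm ht]

lemma pv_str_endswith (n p : String) :
    PySem.Str.endswith n p = decide (p.toList.reverse <+: n.toList.reverse) := by
  exact pv_endswith_eq_decide n.toList p.toList

-- ===== VERDICT (by name: the statement is the Claim_ definition above) =====
theorem classify_role_spec : Claim_equal_classify_role := by
  intro name _
  show classify_role name = classify_role_alt name
  unfold classify_role classify_role_alt
  dsimp only
  rw [pv_walk_root]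
  simp only [pv_str_endswith,
    show (".json" : String).toList.reverse = ['n','o','s','j','.'] from rfl,
    show (".png" : String).toList.reverse = ['g','n','p','.'] from rfl,
    show (".pdf" : String).toList.reverse = ['f','d','p','.'] from rfl,
    show (".csv" : String).toList.reverse = ['v','s','c','.'] from rfl,
    show (".txt" : String).toList.reverse = ['t','x','t','.'] from rfl]
  split_ifs <;> simp_all
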